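-- pv_equiv track=rewrite | github.com/XHermitOne/defis3 | ic/prj/icPrjTree.py | _checkLegalLabel
-- ===== SOURCE A (Python) =====
-- def _checkLegalLabel(label):
--     """
--     Проверка допустимости имени узла.
--
--     :param label: Имя узла.
--     :return: Возвращает True/False.
--     """
--     if not label:
--         return False
--     # проверить допустимость имени
--     for s in list(label):
--         r = ord(s)
--         # Цифры
--         # Большие латинские буквы
--         # Маленькие латинские буквы
--         # Знак подчеркивания
--         if not ((48 <= r <= 57) or (65 <= r <= 90) or (97 <= r <= 122) or (r == 95)):
--             return False
--     return True
-- ===== SOURCE B (Python) =====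
-- import re
--
-- _LEGAL_LABEL_RE = re.compile(r'[0-9A-Za-z_]+\Z')
--
-- def _checkLegalLabel(label):
--     if not label:
--         return False
--     return bool(_LEGAL_LABEL_RE.match(label))
-- ===== Notes on version B (the rewrite author's own statement) =====
-- stated objective: idiomatic
-- what changed: Replaces the explicit per-character ord-range loop with a single precompiled regex full-match over the character class [0-9A-Za-z_].
import Mathlib
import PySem

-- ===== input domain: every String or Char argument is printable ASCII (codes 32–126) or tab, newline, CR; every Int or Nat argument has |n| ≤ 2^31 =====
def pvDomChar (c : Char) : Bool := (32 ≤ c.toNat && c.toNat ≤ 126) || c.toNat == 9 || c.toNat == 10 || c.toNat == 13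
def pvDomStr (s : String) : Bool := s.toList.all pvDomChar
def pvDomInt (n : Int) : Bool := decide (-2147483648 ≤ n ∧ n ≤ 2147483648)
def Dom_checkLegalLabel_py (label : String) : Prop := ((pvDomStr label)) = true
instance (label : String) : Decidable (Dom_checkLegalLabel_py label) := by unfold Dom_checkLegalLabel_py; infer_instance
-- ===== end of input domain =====

-- B replaces A's explicit per-character ord-range loop with an idiomatic whole-string
-- character-class full match (regex in Python; ported as a nonempty + all-chars-in-class check).


-- ===== PORT A =====
-- the for-loop with early 'return False'
def checkLegalLabel_loopA : List Char → Bool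
  | [] => true
  | s :: rest =>
    let r : Nat := s.toNat  -- ord(s)
    if ¬ ((48 ≤ r ∧ r ≤ 57) ∨ (65 ≤ r ∧ r ≤ 90) ∨ (97 ≤ r ∧ r ≤ 122) ∨ r = 95) then
      false
    else
      checkLegalLabel_loopA rest

def checkLegalLabel_py (label : String) : Bool :=
  if label.toList = [] then false   -- 'if not label: return False'
  else checkLegalLabel_loopA label.toList

-- ===== PORT B =====
-- regex character class [0-9A-Za-z_] (exact: the class is ASCII digits, latin letters, underscore)
def checkLegalLabel_wordChar (c : Char) : Bool := c.isAlphanum || c == '_'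

-- bool(_LEGAL_LABEL_RE.match(label)): the whole string matches [0-9A-Za-z_]+
def checkLegalLabel_py_alt (label : String) : Bool :=
  if label.isEmpty then false
  else label.toList.all checkLegalLabel_wordChar

-- ===== PRECONDITION & SPEC =====
def Spec_checkLegalLabel_py (label : String) (out : Bool) : Prop := out = checkLegalLabel_py_alt label
instance (label : String) (out : Bool) : Decidable (Spec_checkLegalLabel_py label out) := by unfold Spec_checkLegalLabel_py; infer_instance

-- ===== CLAIM (what is proved, stated in full; the proofs are below) =====
def Claim_equal_checkLegalLabel_py : Prop := ∀ (label : String), Dom_checkLegalLabel_py label → Spec_checkLegalLabel_py label (checkLegalLabel_py label)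

-- ===== LEMMAS AND PROOFS =====
theorem checkLegalLabel_char_eq (c : Char) :
    (decide ((48 ≤ c.toNat ∧ c.toNat ≤ 57) ∨ (65 ≤ c.toNat ∧ c.toNat ≤ 90) ∨
      (97 ≤ c.toNat ∧ c.toNat ≤ 122) ∨ c.toNat = 95)) = checkLegalLabel_wordChar c := by
  rw [Bool.eq_iff_iff]
  simp only [checkLegalLabel_wordChar, Char.isAlphanum, Char.isAlpha, Char.isDigit,
    Char.isUpper, Char.isLower, Bool.or_eq_true, Bool.and_eq_true, decide_eq_true_eq,
    UInt32.le_iff_toNat_le, beq_iff_eq, Char.ext_iff, ← UInt32.toNat_inj]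
  show ((48 ≤ c.val.toNat ∧ c.val.toNat ≤ 57) ∨ (65 ≤ c.val.toNat ∧ c.val.toNat ≤ 90) ∨
      (97 ≤ c.val.toNat ∧ c.val.toNat ≤ 122) ∨ c.val.toNat = 95) ↔
    (((65 ≤ c.val.toNat ∧ c.val.toNat ≤ 90) ∨ (97 ≤ c.val.toNat ∧ c.val.toNat ≤ 122)) ∨
      (48 ≤ c.val.toNat ∧ c.val.toNat ≤ 57)) ∨ c.val.toNat = 95
  omega

theorem checkLegalLabel_loopA_eq_all (l : List Char) :
    checkLegalLabel_loopA l = l.all checkLegalLabel_wordChar := by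
  induction l with
  | nil => rfl
  | cons c rest ih =>
    simp only [checkLegalLabel_loopA, List.all_cons, ← checkLegalLabel_char_eq c, ih]
    by_cases h : (48 ≤ c.toNat ∧ c.toNat ≤ 57) ∨ (65 ≤ c.toNat ∧ c.toNat ≤ 90) ∨
        (97 ≤ c.toNat ∧ c.toNat ≤ 122) ∨ c.toNat = 95 <;> simp [h]

-- ===== VERDICT (by name: the statement is the Claim_ definition above) =====
theorem checkLegalLabel_py_spec : Claim_equal_checkLegalLabel_py := by
  intro label _
  unfold Spec_checkLegalLabel_py checkLegalLabel_py checkLegalLabel_py_alt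
  rw [checkLegalLabel_loopA_eq_all]
  have he : label.isEmpty = true ↔ label.toList = [] := by
    constructor
    · intro h; rw [String.isEmpty_iff] at h; simp [h]
    · intro h; rw [String.isEmpty_iff, ← String.toList_inj]; simpa using h
  by_cases h : label.toList = []
  · simp [h, he.mpr h]
  · have : label.isEmpty = false := by
      cases hb : label.isEmpty
      · rfl
      · exact absurd (he.mp hb) h
    simp [h, this]
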